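-- pv_equiv track=rewrite | github.com/morawskidotmy/SELFIES_generator | utils.py | tokenize_selfies_string
-- ===== SOURCE A (Python) =====
-- def tokenize_selfies_string(selfies_str):
--     tokens = []
--     i = 0
--     while i < len(selfies_str):
--         ch = selfies_str[i]
--         if ch == "[":
--             end = selfies_str.index("]", i) + 1
--             tokens.append(selfies_str[i:end])
--             i = end
--         else:
--             tokens.append(ch)
--             i += 1
--     return tokens
-- ===== SOURCE B (Python) =====
-- def tokenize_selfies_string(selfies_str):
--     tokens = []
--     buf = None  # open bracket group being accumulated, or None
--     for ch in selfies_str: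
--         if buf is not None:
--             buf.append(ch)
--             if ch == "]":
--                 tokens.append("".join(buf))
--                 buf = None
--         elif ch == "[":
--             buf = [ch]
--         else:
--             tokens.append(ch)
--     if buf is not None:
--         raise ValueError("unterminated '[' group")
--     return tokens
-- ===== Notes on version B (the rewrite author's own statement) =====
-- stated objective: alternative
-- what changed: Replaced the index-jump scanner (while loop with str.index to locate each closing bracket and slice the group out) by a single pass over the characters with an optional accumulator buffer for the currently open bracket group.
import Mathlib
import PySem

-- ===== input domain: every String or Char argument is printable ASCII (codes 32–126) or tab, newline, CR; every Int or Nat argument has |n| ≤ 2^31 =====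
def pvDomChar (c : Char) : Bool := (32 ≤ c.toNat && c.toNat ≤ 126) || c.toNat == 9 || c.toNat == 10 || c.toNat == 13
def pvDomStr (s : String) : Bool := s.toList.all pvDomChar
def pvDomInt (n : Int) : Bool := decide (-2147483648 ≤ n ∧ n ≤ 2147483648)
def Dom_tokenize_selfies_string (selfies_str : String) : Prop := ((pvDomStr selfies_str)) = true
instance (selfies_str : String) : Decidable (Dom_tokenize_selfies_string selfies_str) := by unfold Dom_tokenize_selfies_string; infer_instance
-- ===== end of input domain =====

-- B replaces A's index-jump scanner by a single-pass state machine with an optional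
-- group buffer (alternative decomposition, same O(n) cost; return value only).

-- ===== PORT A =====
-- A scans by index, jumping past each bracket group found with str.index("]", i);
-- ported as structural recursion on the remaining suffix (index jump = drop).
def tokA : List Char → List String
  | [] => []
  | c :: rest =>
    if c = '[' then
      match rest.findIdx? (· = ']') with
      | some j => String.ofList ('[' :: rest.take (j + 1)) :: tokA (rest.drop (j + 1))
      | none => []   -- Python raises ValueError here (excluded by Pre_)
    else String.ofList [c] :: tokA rest
termination_by l => l.length
decreasing_by
  all_goals simp only [List.length_drop, List.length_cons]; omega

def tokenize_selfies_string (selfies_str : String) : List String :=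
  tokA selfies_str.toList

-- ===== PORT B =====
-- state = (tokens so far, optional buffer of the currently open bracket group)
def stepB : List String × Option (List Char) → Char → List String × Option (List Char)
  | (toks, some buf), c =>
      let buf' := buf ++ [c]
      if c = ']' then (toks ++ [String.ofList buf'], none) else (toks, some buf')
  | (toks, none), c =>
      if c = '[' then (toks, some [c]) else (toks ++ [String.ofList [c]], none)

def tokenize_selfies_string_alt (selfies_str : String) : List String :=
  (selfies_str.toList.foldl stepB ([], none)).1
  -- Python B raises ValueError when the final buffer is still open (excluded by Pre_)

-- ===== PRECONDITION & SPEC =====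
-- Pre_ excludes exactly the strings containing a '[' with no ']' anywhere after it:
-- there A raises ValueError (str.index fails) and B raises ValueError as well.
def okBrackets : List Char → Bool
  | [] => true
  | c :: rest => (if c = '[' then decide (']' ∈ rest) else true) && okBrackets rest

def Pre_tokenize_selfies_string (selfies_str : String) : Prop :=
  okBrackets selfies_str.toList = true
instance (selfies_str : String) : Decidable (Pre_tokenize_selfies_string selfies_str) := by
  unfold Pre_tokenize_selfies_string; infer_instance

def pvWitness_tokenize_selfies_string : String := "[C][=C]c1[Br]]"

def Spec_tokenize_selfies_string (selfies_str : String) (out : List String) : Prop := out = tokenize_selfies_string_alt selfies_str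
instance (selfies_str : String) (out : List String) : Decidable (Spec_tokenize_selfies_string selfies_str out) := by unfold Spec_tokenize_selfies_string; infer_instance

-- ===== CLAIM (what is proved, stated in full; the proofs are below) =====
def Claim_equal_tokenize_selfies_string : Prop := ∀ (selfies_str : String), Dom_tokenize_selfies_string selfies_str → Pre_tokenize_selfies_string selfies_str → Spec_tokenize_selfies_string selfies_str (tokenize_selfies_string selfies_str)

-- ===== LEMMAS AND PROOFS =====

theorem okBrackets_tail {c : Char} {rest : List Char}
    (h : okBrackets (c :: rest) = true) : okBrackets rest = true := by
  simp only [okBrackets, Bool.and_eq_true] at h; exact h.2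

theorem okBrackets_drop (n : Nat) (l : List Char)
    (h : okBrackets l = true) : okBrackets (l.drop n) = true := by
  induction l generalizing n with
  | nil => simpa using h
  | cons c rest ih =>
    cases n with
    | zero => exact h
    | succ m => exact ih m (okBrackets_tail h)

theorem okBrackets_bracket {rest : List Char}
    (h : okBrackets ('[' :: rest) = true) : ']' ∈ rest := by
  simp only [okBrackets, Bool.and_eq_true] at h
  simpa using h.1

-- folding over characters that are not ']' while a buffer is open only grows the buffer
theorem foldl_stepB_buf (g : List Char) (hg : ']' ∉ g) :
    ∀ (l : List Char) (toks : List String) (buf : List Char),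
      (g ++ l).foldl stepB (toks, some buf) = l.foldl stepB (toks, some (buf ++ g)) := by
  induction g with
  | nil => intro l toks buf; simp
  | cons c g ih =>
    intro l toks buf
    have hc : c ≠ ']' := fun h => hg (h ▸ List.mem_cons_self ..)
    simp only [List.cons_append, List.foldl_cons, stepB, if_neg hc]
    rw [ih (fun h => hg (List.mem_cons_of_mem _ h)) l toks (buf ++ [c])]
    simp

theorem main_lemma :
    ∀ (l : List Char) (toks : List String), okBrackets l = true →
      l.foldl stepB (toks, none) = (toks ++ tokA l, none) := by
  intro l
  induction l using tokA.induct with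
  | case1 => intro toks _; simp [tokA]
  | case2 rest j hfind ih =>
    intro toks hok
    obtain ⟨hj, hpj, hlt⟩ := List.findIdx?_eq_some_iff_getElem.mp hfind
    have hgj : rest[j] = ']' := by simpa using hpj
    have hdecomp : rest = rest.take j ++ ']' :: rest.drop (j + 1) := by
      conv_lhs => rw [← List.take_append_drop j rest, List.drop_eq_getElem_cons hj, hgj]
    have hnotin : ']' ∉ rest.take j := by
      intro hmem
      obtain ⟨k, hk, hk2⟩ := List.mem_take_iff_getElem.mp hmem
      exact absurd (by simpa [hk2] : (fun c => decide (c = ']')) rest[k] = true)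
        (by simpa using hlt k (by omega))
    have htake : rest.take (j + 1) = rest.take j ++ [']'] := by
      rw [List.take_succ]; simp [hj, hgj]
    calc ('[' :: rest).foldl stepB (toks, none)
        = rest.foldl stepB (toks, some ['[']) := by
          simp [List.foldl_cons, stepB]
      _ = ((rest.take j ++ ']' :: rest.drop (j + 1))).foldl stepB (toks, some ['[']) := by
          rw [← hdecomp]
      _ = (']' :: rest.drop (j + 1)).foldl stepB (toks, some ('[' :: rest.take j)) := by
          rw [foldl_stepB_buf _ hnotin]; rfl
      _ = (rest.drop (j + 1)).foldl stepB
            (toks ++ [String.ofList ('[' :: rest.take j ++ [']'])], none) := by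
          rw [List.foldl_cons]; rfl
      _ = (toks ++ [String.ofList ('[' :: rest.take j ++ [']'])] ++ tokA (rest.drop (j + 1)), none) := by
          exact ih _ (okBrackets_drop (j + 1) rest (okBrackets_tail hok))
      _ = (toks ++ tokA ('[' :: rest), none) := by
          simp [tokA, hfind, htake, List.append_assoc]
  | case3 rest hfind =>
    intro toks hok
    have := okBrackets_bracket hok
    rw [List.findIdx?_eq_none_iff] at hfind
    simpa using hfind ']' this
  | case4 c rest hc ih =>
    intro toks hok
    rw [List.foldl_cons, show stepB (toks, none) c = (toks ++ [String.ofList [c]], none) from by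
      simp [stepB, hc]]
    rw [ih (toks ++ [String.ofList [c]]) (okBrackets_tail hok)]
    simp [tokA, hc, List.append_assoc]

-- ===== VERDICT (by name: the statement is the Claim_ definition above) =====
theorem tokenize_selfies_string_spec : Claim_equal_tokenize_selfies_string := by
  intro s _ hpre
  unfold Spec_tokenize_selfies_string tokenize_selfies_string tokenize_selfies_string_alt
  rw [main_lemma s.toList [] hpre]
  simp
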